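-- pv_equiv track=rewrite | github.com/indrareddy12/QUICKAI-FULL-STACK | OneDrive/Desktop/CodingQU.py/3rd.py | convert
-- ===== SOURCE A (Python) =====
-- def convert(input_str):
--     lower=sum(1 for char in input_str if char.islower())
--     upper=sum(1 for char in input_str if char.isupper())
--
--     if lower>upper:
--         return input_str.lower()
--     elif upper>lower:
--         return input_str.upper()
--     else:
--         return input_str
-- ===== SOURCE B (Python) =====
-- def convert(input_str):
--     # Pair-cancellation (Boyer-Moore-majority style): each letter cancels one
--     # pending letter of the opposite case off a stack; the survivors decide.
--     flags = [c.islower() for c in input_str if c.islower() or c.isupper()]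
--     stack = []
--     for f in flags:
--         if stack and stack[-1] != f:
--             stack.pop()
--         else:
--             stack.append(f)
--     if not stack:
--         return input_str
--     return input_str.lower() if stack[-1] else input_str.upper()
-- ===== Notes on version B (the rewrite author's own statement) =====
-- stated objective: alternative
-- what changed: Replaces the two counting passes and numeric comparison with a Boyer-Moore-style stack of uncancelled letters: each letter cancels one pending opposite-case letter off the stack, and the surviving stack (empty / lowercase / uppercase) selects the result; no counts are computed.
import Mathlib
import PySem

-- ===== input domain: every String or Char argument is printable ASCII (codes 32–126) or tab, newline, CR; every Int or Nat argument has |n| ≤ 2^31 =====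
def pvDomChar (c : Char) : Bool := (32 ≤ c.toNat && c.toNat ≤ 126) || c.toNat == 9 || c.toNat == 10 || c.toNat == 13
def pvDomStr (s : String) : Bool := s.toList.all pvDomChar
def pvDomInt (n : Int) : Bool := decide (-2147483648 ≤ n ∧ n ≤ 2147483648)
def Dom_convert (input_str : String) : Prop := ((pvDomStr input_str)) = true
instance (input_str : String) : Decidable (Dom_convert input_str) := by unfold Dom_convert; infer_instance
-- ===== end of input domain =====

-- B replaces A's two counting passes by a stack of uncancelled letters (pair cancellation); alternative decomposition, same behaviour.

-- ===== PORT A =====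
def convert (input_str : String) : String :=
  let lower : Int := input_str.toList.foldl (fun a c => if PySem.Chars.islower c then a + 1 else a) 0
  let upper : Int := input_str.toList.foldl (fun a c => if PySem.Chars.isupper c then a + 1 else a) 0
  if lower > upper then PySem.Str.lower input_str
  else if upper > lower then PySem.Str.upper input_str
  else input_str

-- ===== PORT B =====
-- the stack's top is the list head (Python appends/pops at the end; same stack discipline)
def stepB (st : List Bool) (f : Bool) : List Bool :=
  match st with
  | [] => [f]
  | t :: r => if t ≠ f then r else f :: t :: r

def convert_alt (input_str : String) : String :=
  let flags : List Bool :=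
    (input_str.toList.filter (fun c => PySem.Chars.islower c || PySem.Chars.isupper c)).map
      PySem.Chars.islower
  let stack := flags.foldl stepB []
  match stack with
  | [] => input_str
  | true :: _ => PySem.Str.lower input_str
  | false :: _ => PySem.Str.upper input_str

-- ===== PRECONDITION & SPEC =====
def Spec_convert (input_str : String) (out : String) : Prop := out = convert_alt input_str
instance (input_str : String) (out : String) : Decidable (Spec_convert input_str out) := by unfold Spec_convert; infer_instance

-- ===== CLAIM (what is proved, stated in full; the proofs are below) =====
def Claim_equal_convert : Prop := ∀ (input_str : String), Dom_convert input_str → Spec_convert input_str (convert input_str)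

-- ===== LEMMAS AND PROOFS =====
-- signed size of a homogeneous stack
def pvVal : List Bool → Int
  | [] => 0
  | t :: r => if t then (r.length + 1 : Int) else -(r.length + 1)

-- homogeneity invariant of the stack
def pvHm (st : List Bool) : Prop := ∀ a ∈ st, ∀ b ∈ st, a = b

theorem not_lower_and_upper (c : Char) :
    ¬ (PySem.Chars.islower c = true ∧ PySem.Chars.isupper c = true) := by
  rintro ⟨h1, h2⟩
  unfold PySem.Chars.islower at h1
  unfold PySem.Chars.isupper at h2
  simp [Char.le_def, UInt32.le_iff_toNat_le] at h1 h2
  omega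

theorem stepB_hm (st : List Bool) (f : Bool) (h : pvHm st) : pvHm (stepB st f) := by
  cases st with
  | nil => intro a ha b hb; simp [stepB] at ha hb; simp [ha, hb]
  | cons t r =>
    by_cases hf : t = f
    · have hr : ∀ x ∈ t :: r, x = t := fun x hx => h x hx t (by simp)
      have hst2 : stepB (t :: r) f = f :: t :: r := by simp [stepB, hf]
      have key : ∀ x ∈ f :: t :: r, x = f := by
        intro x hx
        simp only [List.mem_cons] at hx
        rcases hx with hx | hx | hx
        · exact hx
        · rw [hx, hf]
        · rw [hr x (by simp [hx]), hf]
      intro a ha b hb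
      rw [hst2] at ha hb
      rw [key a ha, key b hb]
    · intro a ha b hb
      simp [stepB, hf] at ha hb
      exact h a (by simp [ha]) b (by simp [hb])

theorem stepB_val (st : List Bool) (f : Bool) (h : pvHm st) :
    pvVal (stepB st f) = pvVal st + (if f then 1 else -1) := by
  cases st with
  | nil => cases f <;> simp [stepB, pvVal]
  | cons t r =>
    by_cases hf : t = f
    · subst hf
      cases t <;> simp [stepB, pvVal] <;> push_cast <;> ring
    · have hfr : ∀ x ∈ r, x = t := fun x hx => h x (by simp [hx]) t (by simp)
      cases r with
      | nil =>
        cases t <;> cases f <;> simp_all [stepB, pvVal]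
      | cons u r' =>
        have hu : u = t := hfr u (by simp)
        subst hu
        clear hfr h
        cases u <;> cases f <;> simp_all [stepB, pvVal]

theorem fold_stepB (l : List Bool) : ∀ (st : List Bool), pvHm st →
    pvHm (l.foldl stepB st) ∧
    pvVal (l.foldl stepB st) = l.foldl (fun a f => a + (if f then 1 else -1)) (pvVal st) := by
  induction l with
  | nil => intro st h; exact ⟨h, rfl⟩
  | cons f l ih =>
    intro st h
    have h' := stepB_hm st f h
    have hv := stepB_val st f h
    simpa [List.foldl, hv] using ih (stepB st f) h'

theorem flags_net (l : List Char) : ∀ (a b n : Int), n = a - b →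
    ((l.filter (fun c => PySem.Chars.islower c || PySem.Chars.isupper c)).map
        PySem.Chars.islower).foldl (fun a f => a + (if f then 1 else -1)) n
      = l.foldl (fun a c => if PySem.Chars.islower c then a + 1 else a) a
        - l.foldl (fun a c => if PySem.Chars.isupper c then a + 1 else a) b := by
  induction l with
  | nil => intro a b n h; simpa using h
  | cons c l ih =>
    intro a b n h
    by_cases h1 : PySem.Chars.islower c = true
    · have h2 : PySem.Chars.isupper c = false := by
        by_contra hc
        exact not_lower_and_upper c ⟨h1, by simpa using hc⟩
      simp only [List.filter_cons, List.foldl, h1, h2]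
      simp only [Bool.true_or, if_pos trivial, List.map_cons, List.foldl, h1]
      exact ih (a + 1) b (n + 1) (by omega)
    · have h1' : PySem.Chars.islower c = false := by simpa using h1
      by_cases h2 : PySem.Chars.isupper c = true
      · simp only [List.filter_cons, List.foldl, h1', h2]
        simp only [Bool.false_or, if_pos trivial, List.map_cons, List.foldl, h1']
        exact ih a (b + 1) (n - 1) (by omega)
      · have h2' : PySem.Chars.isupper c = false := by simpa using h2
        simp only [List.filter_cons, List.foldl, h1', h2']
        simpa using ih a b n h

-- ===== VERDICT (by name: the statement is the Claim_ definition above) =====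
theorem convert_spec : Claim_equal_convert := by
  intro s _
  unfold Spec_convert convert convert_alt
  set flags := ((s.toList.filter (fun c => PySem.Chars.islower c || PySem.Chars.isupper c)).map
      PySem.Chars.islower) with hflags
  set L := s.toList.foldl (fun a c => if PySem.Chars.islower c then a + 1 else a) (0 : Int) with hL
  set U := s.toList.foldl (fun a c => if PySem.Chars.isupper c then a + 1 else a) (0 : Int) with hU
  obtain ⟨hhm, hval⟩ := fold_stepB flags [] (by intro a ha; simp at ha)
  have hnet : pvVal (flags.foldl stepB []) = L - U := by
    rw [hval]
    simpa [pvVal] using flags_net s.toList 0 0 0 (by ring)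
  show (if L > U then PySem.Str.lower s else if U > L then PySem.Str.upper s else s)
      = (match flags.foldl stepB [] with
         | [] => s
         | true :: _ => PySem.Str.lower s
         | false :: _ => PySem.Str.upper s)
  rcases hst : flags.foldl stepB [] with _ | ⟨t, r⟩
  · have : L = U := by rw [hst] at hnet; simp [pvVal] at hnet; omega
    simp [this]
  · rw [hst] at hnet
    cases t
    · have : U > L := by
        simp [pvVal] at hnet
        have : (0 : Int) < (r.length : Int) + 1 := by positivity
        omega
      simp [this, not_lt.mpr (le_of_lt this)]
    · have : L > U := by
        simp [pvVal] at hnet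
        have : (0 : Int) < (r.length : Int) + 1 := by positivity
        omega
      simp [this]
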